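-- pv_equiv track=rewrite | github.com/maldavan5916/VacTimeTP | Documentation/DIPLOM/listingCode/CompresCode.py | compress_code
-- ===== SOURCE A (Python) =====
-- def compress_code(code):
--     operators = ['=', ';', '{', '}', '(', ')', ',', '.', '+', '-', '*', '/', '>', '<', '!', '&', '|']
--     in_string = False
--     result = []
--     i = 0
--     while i < len(code):
--         if code[i] == '"':
--             in_string = not in_string
--             result.append(code[i])
--             i += 1
--         elif in_string:
--             result.append(code[i])
--             i += 1
--         elif code[i] in operators:
--             while result and result[-1] == ' ':
--                 result.pop()
--             result.append(code[i])
--             i += 1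
--             while i < len(code) and code[i] == ' ':
--                 i += 1
--         else:
--             result.append(code[i])
--             i += 1
--     return ''.join(result)
-- ===== SOURCE B (Python) =====
-- def compress_code(code):
--     ops = '=;{}(),.+-*/><!&|'
--
--     def strip(seg):
--         out = []
--         prev_op = False
--         for i, c in enumerate(seg):
--             if c == ' ':
--                 nxt = seg[i + 1:].lstrip(' ')
--                 if not (prev_op or (nxt and nxt[0] in ops)):
--                     out.append(' ')
--             else:
--                 out.append(c)
--                 prev_op = c in ops
--         return ''.join(out)
--
--     parts = []
--     rest = code
--     outside = True
--     while True:
--         seg, sep, rest = rest.partition('"')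
--         parts.append(strip(seg) if outside else seg)
--         if not sep:
--             break
--         parts.append('"')
--         outside = not outside
--     return ''.join(parts)
-- ===== Notes on version B (the rewrite author's own statement) =====
-- stated objective: faster
-- what changed: Replaces A's char-by-char in_string state machine with pop-trailing/skip-leading space handling by a partition-on-'"' pipeline: outside segments get a single strip pass that keeps a space only if neither adjacent non-space neighbour is an operator, inside segments are copied verbatim, and the pieces are rejoined with quotes.
import Mathlib
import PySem

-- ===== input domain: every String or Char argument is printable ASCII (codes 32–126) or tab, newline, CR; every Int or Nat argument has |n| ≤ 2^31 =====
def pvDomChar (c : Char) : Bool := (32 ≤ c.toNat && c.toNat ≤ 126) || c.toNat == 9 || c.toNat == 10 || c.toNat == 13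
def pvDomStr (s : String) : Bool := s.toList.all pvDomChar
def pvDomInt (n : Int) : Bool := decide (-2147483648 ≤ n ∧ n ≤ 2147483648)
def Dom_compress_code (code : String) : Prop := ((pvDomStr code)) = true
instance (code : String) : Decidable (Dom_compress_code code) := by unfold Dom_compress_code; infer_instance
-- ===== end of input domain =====

-- B replaces A's char-by-char in_string state machine (with pop-trailing/skip-leading spaces)
-- by a partition-on-'"' pipeline stripping spaces adjacent to operators per outside segment;
-- objective: faster (measured); equal return value proved for all inputs.

-- ===== PORT A =====
def opsA : List Char := ['=', ';', '{', '}', '(', ')', ',', '.', '+', '-', '*', '/', '>', '<', '!', '&', '|']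

-- the while loop of A: state (in_string, result as reversed list, remaining chars)
def caLoop : Bool → List Char → List Char → List Char
  | _, acc, [] => acc.reverse
  | inStr, acc, c :: cs =>
    if c = '"' then caLoop (!inStr) (c :: acc) cs
    else if inStr then caLoop inStr (c :: acc) cs
    else if opsA.contains c then
      -- pop trailing spaces from result, append operator, skip following spaces
      caLoop inStr (c :: acc.dropWhile (· = ' ')) (cs.dropWhile (· = ' '))
    else caLoop inStr (c :: acc) cs
termination_by _ _ cs => cs.length
decreasing_by
  · simp
  · simp
  · have := List.length_dropWhile_le (· = ' ') cs
    simp; omega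
  · simp

def compress_code (code : String) : String := String.ofList (caLoop false [] code.toList)

-- ===== PORT B =====
def opsB : List Char := ['=', ';', '{', '}', '(', ')', ',', '.', '+', '-', '*', '/', '>', '<', '!', '&', '|']

-- 'nxt and nxt[0] in ops' of Source B
def cbLook : List Char → Bool
  | [] => false
  | d :: _ => opsB.contains d

-- Source B's strip: a space is kept only if neither the previous non-space char (prevOp)
-- nor the next non-space char of the segment is an operator
def cbStrip : Bool → List Char → List Char
  | _, [] => []
  | prevOp, c :: cs =>
    if c = ' ' then
      if prevOp || cbLook (cs.dropWhile (· = ' ')) then cbStrip prevOp cs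
      else ' ' :: cbStrip prevOp cs
    else c :: cbStrip (opsB.contains c) cs

-- Source B's partition('"') loop, alternating outside/inside segments;
-- rest.partition('"') is ported exactly as (takeWhile (· ≠ '"'), dropWhile (· ≠ '"'))
mutual
def cbOut (cs : List Char) : List Char :=
  cbStrip false (cs.takeWhile (· ≠ '"')) ++
    (if h : cs.dropWhile (· ≠ '"') = [] then []
     else '"' :: cbIn (cs.dropWhile (· ≠ '"')).tail)
termination_by cs.length
decreasing_by
  have h1 := List.length_dropWhile_le (· ≠ '"') cs
  have h2 : (cs.dropWhile (· ≠ '"')).length ≠ 0 := by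
    simpa using fun hc => h (List.eq_nil_of_length_eq_zero hc)
  rw [List.length_tail]
  omega

def cbIn (cs : List Char) : List Char :=
  cs.takeWhile (· ≠ '"') ++
    (if h : cs.dropWhile (· ≠ '"') = [] then []
     else '"' :: cbOut (cs.dropWhile (· ≠ '"')).tail)
termination_by cs.length
decreasing_by
  have h1 := List.length_dropWhile_le (· ≠ '"') cs
  have h2 : (cs.dropWhile (· ≠ '"')).length ≠ 0 := by
    simpa using fun hc => h (List.eq_nil_of_length_eq_zero hc)
  rw [List.length_tail]
  omega
end

def compress_code_alt (code : String) : String := String.ofList (cbOut code.toList)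

-- ===== PRECONDITION & SPEC =====
def Spec_compress_code (code : String) (out : String) : Prop := out = compress_code_alt code
instance (code : String) (out : String) : Decidable (Spec_compress_code code out) := by unfold Spec_compress_code; infer_instance

-- ===== CLAIM (what is proved, stated in full; the proofs are below) =====
def Claim_equal_compress_code : Prop := ∀ (code : String), Dom_compress_code code → Spec_compress_code code (compress_code code)

-- ===== LEMMAS AND PROOFS =====

-- intermediate char-by-char form of B: inString flag + prevOp flag, no pop/skip
def pvF : Bool → Bool → List Char → List Char
  | _, _, [] => []
  | inS, p, c :: cs =>
    if c = '"' then c :: pvF (!inS) false cs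
    else if inS then c :: pvF inS p cs
    else if c = ' ' then
      (if p || cbLook (cs.dropWhile (· = ' ')) then pvF false p cs
       else ' ' :: pvF false p cs)
    else c :: pvF false (opsB.contains c) cs

lemma opsAB (c : Char) : opsA.contains c = opsB.contains c := rfl

lemma predq : (fun x : Char => decide ¬x = '"') = (fun x : Char => !decide (x = '"')) := by
  funext x; simp

lemma look_quote (cs : List Char) : cbLook ('"' :: cs) = false := rfl

lemma look_cons (c : Char) (cs : List Char) : cbLook (c :: cs) = opsB.contains c := rfl

lemma dwsp_cons_neg {c : Char} (h : ¬ c = ' ') (l : List Char) :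
    List.dropWhile (· = ' ') (c :: l) = c :: l := by
  simp [List.dropWhile_cons, h]

lemma dwsp_cons_pos (l : List Char) :
    List.dropWhile (· = ' ') (' ' :: l) = List.dropWhile (· = ' ') l := by
  simp [List.dropWhile_cons]

-- unfolding lemmas for caLoop
lemma caLoop_nil (inS : Bool) (acc : List Char) : caLoop inS acc [] = acc.reverse := by
  simp [caLoop]

lemma caLoop_quote (inS : Bool) (acc cs : List Char) :
    caLoop inS acc ('"' :: cs) = caLoop (!inS) ('"' :: acc) cs := by
  simp [caLoop]

lemma caLoop_inStr (acc cs : List Char) (c : Char) (h : ¬ c = '"') :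
    caLoop true acc (c :: cs) = caLoop true (c :: acc) cs := by
  simp [caLoop, h]

lemma caLoop_op (acc cs : List Char) (c : Char) (h : ¬ c = '"') (h2 : opsA.contains c = true) :
    caLoop false acc (c :: cs) =
      caLoop false (c :: acc.dropWhile (· = ' ')) (cs.dropWhile (· = ' ')) := by
  simp at h2
  simp [caLoop, h, h2]

lemma caLoop_other (acc cs : List Char) (c : Char) (h : ¬ c = '"') (h2 : opsA.contains c = false) :
    caLoop false acc (c :: cs) = caLoop false (c :: acc) cs := by
  simp at h2
  simp [caLoop, h, h2]

-- unfolding lemmas for pvF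
lemma pvF_quote (inS p : Bool) (cs : List Char) :
    pvF inS p ('"' :: cs) = '"' :: pvF (!inS) false cs := by
  simp [pvF]

lemma pvF_inStr (p : Bool) (cs : List Char) (c : Char) (h : ¬ c = '"') :
    pvF true p (c :: cs) = c :: pvF true p cs := by
  simp [pvF, h]

lemma pvF_space (p : Bool) (cs : List Char) :
    pvF false p (' ' :: cs) =
      if p || cbLook (cs.dropWhile (· = ' ')) then pvF false p cs
      else ' ' :: pvF false p cs := by
  simp [pvF]

lemma pvF_char (p : Bool) (cs : List Char) (c : Char) (h : ¬ c = '"') (h2 : ¬ c = ' ') :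
    pvF false p (c :: cs) = c :: pvF false (opsB.contains c) cs := by
  simp [pvF, h, h2]

lemma space_not_op : opsB.contains ' ' = false := by decide

lemma dropWhile_space_head (cs : List Char) (d : Char) (r : List Char)
    (h : cs.dropWhile (· = ' ') = d :: r) : ¬ d = ' ' := by
  induction cs with
  | nil => simp at h
  | cons c cs ih =>
    by_cases hc : c = ' '
    · rw [List.dropWhile_cons_of_pos (by simp [hc])] at h
      exact ih h
    · rw [List.dropWhile_cons_of_neg (by simp [hc])] at h
      cases h; exact hc

lemma pvF_true_drop (cs : List Char) :
    pvF false true cs = pvF false true (cs.dropWhile (· = ' ')) := by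
  induction cs with
  | nil => rfl
  | cons c cs ih =>
    by_cases h : c = ' '
    · subst h
      rw [List.dropWhile_cons_of_pos (by simp), pvF_space]
      simpa using ih
    · rw [List.dropWhile_cons_of_neg (by simp [h])]

lemma look_takeWhile (cs : List Char) :
    cbLook ((cs.takeWhile (· ≠ '"')).dropWhile (· = ' ')) =
    cbLook (cs.dropWhile (· = ' ')) := by
  induction cs with
  | nil => rfl
  | cons c cs ih =>
    by_cases hq : c = '"'
    · subst hq
      rw [List.takeWhile_cons_of_neg (by simp), List.dropWhile_cons_of_neg (by simp)]
      simp [cbLook]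
      decide
    · rw [List.takeWhile_cons_of_pos (by simp [hq])]
      by_cases hs : c = ' '
      · subst hs
        rw [List.dropWhile_cons_of_pos (by simp), List.dropWhile_cons_of_pos (by simp)]
        exact ih
      · rw [List.dropWhile_cons_of_neg (by simp [hs]), List.dropWhile_cons_of_neg (by simp [hs])]
        rfl

-- A's loop equals pvF, with the pending-pop accounting on acc
lemma caLoop_pvF : ∀ n (cs : List Char), cs.length ≤ n →
    (∀ acc p, caLoop true acc cs = acc.reverse ++ pvF true p cs) ∧
    (∀ acc p, p = cbLook (acc.dropWhile (· = ' ')) →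
      (acc.head? = some ' ' → p = false) →
      (p = true → cs.head? ≠ some ' ') →
      caLoop false acc cs =
        (if cbLook (cs.dropWhile (· = ' ')) then acc.dropWhile (· = ' ') else acc).reverse
          ++ pvF false p cs) := by
  intro n
  induction n with
  | zero =>
    intro cs hlen
    have : cs = [] := List.eq_nil_of_length_eq_zero (Nat.le_zero.mp hlen)
    subst this
    refine ⟨fun acc p => by simp [caLoop_nil, pvF], fun acc p _ _ _ => ?_⟩
    simp [caLoop_nil, pvF, cbLook]
  | succ n ih =>
    intro cs hlen
    match cs with
    | [] =>
      refine ⟨fun acc p => by simp [caLoop_nil, pvF], fun acc p _ _ _ => ?_⟩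
      simp [caLoop_nil, pvF, cbLook]
    | c :: cs =>
      have hcs : cs.length ≤ n := by simp at hlen; omega
      constructor
      · -- in-string mode
        intro acc p
        by_cases hq : c = '"'
        · subst hq
          rw [caLoop_quote]
          simp only [Bool.not_true]
          rw [(ih cs hcs).2 ('"' :: acc) false
            (by rw [List.dropWhile_cons_of_neg (by simp)]; simp [look_cons]; decide)
            (by simp) (by simp)]
          rw [dwsp_cons_neg (by decide) acc]
          rw [pvF_quote]
          split <;> simp
        · rw [caLoop_inStr _ _ _ hq, (ih cs hcs).1 (c :: acc) p, pvF_inStr _ _ _ hq]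
          simp
      · -- outside-string mode
        intro acc p hp hs h3
        by_cases hq : c = '"'
        · subst hq
          rw [caLoop_quote]
          simp only [Bool.not_false]
          rw [(ih cs hcs).1 ('"' :: acc) false]
          rw [dwsp_cons_neg (by decide) cs]
          rw [look_quote, pvF_quote]
          simp
        · by_cases hsp : c = ' '
          · subst hsp
            have hpf : p = false := by
              cases hpv : p
              · rfl
              · exact ((h3 hpv) (by simp)).elim
            subst hpf
            rw [caLoop_other _ _ _ (by simp) space_not_op]
            rw [(ih cs hcs).2 (' ' :: acc) false
              (by rw [List.dropWhile_cons_of_pos (by simp)]; exact hp)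
              (fun _ => rfl) (by simp)]
            rw [dwsp_cons_pos acc, dwsp_cons_pos cs]
            rw [pvF_space]
            by_cases hl : cbLook (cs.dropWhile (· = ' ')) = true
            · rw [hl]; simp
            · simp only [Bool.not_eq_true] at hl
              rw [hl]; simp
          · by_cases hop : opsA.contains c = true
            · -- operator
              have hopB : opsB.contains c = true := by rw [← opsAB]; exact hop
              have hmem : c ∈ opsB := by simpa using hopB
              rw [caLoop_op _ _ _ hq hop]
              have hlen2 : (cs.dropWhile (· = ' ')).length ≤ n := by
                have := List.length_dropWhile_le (· = ' ') cs; omega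
              rw [(ih _ hlen2).2 (c :: acc.dropWhile (· = ' ')) true
                (by rw [dwsp_cons_neg hsp (acc.dropWhile (· = ' '))]
                    simp [look_cons, hmem])
                (by intro hcon; simp [hsp] at hcon)
                (by intro _ hcon
                    rcases hhd : cs.dropWhile (· = ' ') with _ | ⟨d, r⟩
                    · simp [hhd] at hcon
                    · rw [hhd] at hcon; simp at hcon
                      exact dropWhile_space_head cs d r hhd hcon)]
              rw [dwsp_cons_neg hsp (acc.dropWhile (· = ' ')), dwsp_cons_neg hsp cs]
              rw [show cbLook (c :: cs) = true by simp [look_cons, hmem]]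
              rw [pvF_char _ _ _ hq hsp]
              rw [hopB]
              rw [← pvF_true_drop]
              split <;> simp
            · -- ordinary character
              simp only [Bool.not_eq_true] at hop
              have hopB : opsB.contains c = false := by rw [← opsAB]; exact hop
              have hmem : c ∉ opsB := by simpa using hopB
              rw [caLoop_other _ _ _ hq hop]
              rw [(ih cs hcs).2 (c :: acc) (opsB.contains c)
                (by rw [dwsp_cons_neg hsp acc]; simp [look_cons])
                (by intro hcon; simp [hsp] at hcon)
                (by rw [hopB]; simp)]
              rw [dwsp_cons_neg hsp acc, dwsp_cons_neg hsp cs]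
              rw [show cbLook (c :: cs) = false by simp [look_cons, hmem]]
              rw [pvF_char _ _ _ hq hsp]
              simp

-- B's partition pipeline equals pvF
lemma pvF_cb : ∀ (cs : List Char),
    (∀ p, pvF false p cs = cbStrip p (cs.takeWhile (· ≠ '"')) ++
      (if cs.dropWhile (· ≠ '"') = [] then []
       else '"' :: cbIn (cs.dropWhile (· ≠ '"')).tail)) ∧
    (∀ p, pvF true p cs = cs.takeWhile (· ≠ '"') ++
      (if cs.dropWhile (· ≠ '"') = [] then []
       else '"' :: cbOut (cs.dropWhile (· ≠ '"')).tail)) := by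
  intro cs
  induction cs with
  | nil => exact ⟨fun p => by simp [pvF, cbStrip], fun p => by simp [pvF]⟩
  | cons c cs ih =>
    constructor
    · intro p
      by_cases hq : c = '"'
      · subst hq
        rw [pvF_quote]
        simp only [Bool.not_false]
        rw [List.takeWhile_cons_of_neg (by simp), List.dropWhile_cons_of_neg (by simp)]
        rw [(ih).2 false]
        simp [cbStrip, cbIn, predq]
      · rw [List.takeWhile_cons_of_pos (by simp [hq]),
            List.dropWhile_cons_of_pos (by simp [hq])]
        by_cases hsp : c = ' '
        · subst hsp
          rw [pvF_space]
          rw [show cbStrip p (' ' :: cs.takeWhile (· ≠ '"')) =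
              if p || cbLook ((cs.takeWhile (· ≠ '"')).dropWhile (· = ' ')) then
                cbStrip p (cs.takeWhile (· ≠ '"'))
              else ' ' :: cbStrip p (cs.takeWhile (· ≠ '"')) by simp [cbStrip]]
          rw [look_takeWhile]
          by_cases hc : (p || cbLook (cs.dropWhile (· = ' '))) = true
          · rw [hc]; simp only [if_pos rfl]; exact (ih).1 p
          · simp only [Bool.not_eq_true] at hc
            rw [hc]; simp only [Bool.false_eq_true, if_neg, if_false]
            rw [(ih).1 p]; simp
        · rw [pvF_char _ _ _ hq hsp]
          rw [show cbStrip p (c :: cs.takeWhile (· ≠ '"')) =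
              c :: cbStrip (opsB.contains c) (cs.takeWhile (· ≠ '"')) by simp [cbStrip, hsp]]
          rw [(ih).1 (opsB.contains c)]
          simp
    · intro p
      by_cases hq : c = '"'
      · subst hq
        rw [pvF_quote]
        simp only [Bool.not_true]
        rw [List.takeWhile_cons_of_neg (by simp), List.dropWhile_cons_of_neg (by simp)]
        rw [(ih).1 false]
        simp [cbOut, predq]
      · rw [pvF_inStr _ _ _ hq]
        rw [List.takeWhile_cons_of_pos (by simp [hq]),
            List.dropWhile_cons_of_pos (by simp [hq])]
        rw [(ih).2 p]
        simp

lemma cbOut_eq (cs : List Char) : cbOut cs =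
    cbStrip false (cs.takeWhile (· ≠ '"')) ++
    (if cs.dropWhile (· ≠ '"') = [] then []
     else '"' :: cbIn (cs.dropWhile (· ≠ '"')).tail) := by
  conv_lhs => rw [cbOut]
  by_cases hd : cs.dropWhile (· ≠ '"') = [] <;> simp [hd]

lemma caLoop_cbOut (cs : List Char) : caLoop false [] cs = cbOut cs := by
  have h1 := (caLoop_pvF cs.length cs le_rfl).2 [] false rfl (by simp) (by simp)
  have h1' : caLoop false [] cs = pvF false false cs := by
    rw [h1]; split <;> simp
  have h2 := (pvF_cb cs).1 false
  rw [h1', h2, cbOut_eq]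

-- ===== VERDICT (by name: the statement is the Claim_ definition above) =====
theorem compress_code_spec : Claim_equal_compress_code := by
  intro code _
  unfold Spec_compress_code compress_code compress_code_alt
  rw [caLoop_cbOut]
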